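-- pv_equiv track=rewrite | github.com/RCOSDP/weko | modules/weko-items-rest/weko_items_rest/utils.py | build_default_endpoint_prefixes
-- ===== SOURCE A (Python) =====
-- def build_default_endpoint_prefixes(records_rest_endpoints):
--     """Build the default_endpoint_prefixes map.
--
--     :param records_rest_endpoints: endpoints config info
--     """
--     pid_types = set()
--     guessed = set()
--     endpoint_prefixes = {}
--
--     for key, endpoint in records_rest_endpoints.items():
--         pid_type = endpoint['pid_type']
--         pid_types.add(pid_type)
--         is_guessed = key == pid_type
--         is_default = endpoint.get('default_endpoint_prefix', False)
--
--         if is_default: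
--             if pid_type in endpoint_prefixes and pid_type not in guessed:
--                 raise ValueError('More than one "{0}" defined.'.format(
--                     pid_type
--                 ))
--             endpoint_prefixes[pid_type] = key
--             guessed -= {pid_type}
--         elif is_guessed and pid_type not in endpoint_prefixes:
--             endpoint_prefixes[pid_type] = key
--             guessed |= {pid_type}
--
--     not_found = pid_types - set(endpoint_prefixes.keys())
--     if not_found:
--         raise ValueError('No endpoint-prefix for {0}.'.format(
--             ', '.join(not_found)
--         ))
--
--     return endpoint_prefixes
-- ===== SOURCE B (Python) =====
-- def build_default_endpoint_prefixes(records_rest_endpoints):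
--     """Build the default_endpoint_prefixes map (two filtered passes, no 'guessed' set)."""
--     items = [(key, endpoint['pid_type'],
--               bool(endpoint.get('default_endpoint_prefix', False)))
--              for key, endpoint in records_rest_endpoints.items()]
--     pid_types = {pid_type for _, pid_type, _ in items}
--     defaults = {}
--     for key, pid_type, is_default in items:
--         if is_default:
--             if pid_type in defaults:
--                 raise ValueError('More than one "{0}" defined.'.format(pid_type))
--             defaults[pid_type] = key
--     prefixes = {}
--     for key, pid_type, is_default in items:
--         if (is_default or key == pid_type) and pid_type not in prefixes:
--             prefixes[pid_type] = defaults.get(pid_type, pid_type)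
--     not_found = pid_types - set(prefixes)
--     if not_found:
--         raise ValueError('No endpoint-prefix for {0}.'.format(', '.join(not_found)))
--     return prefixes
-- ===== Notes on version B (the rewrite author's own statement) =====
-- stated objective: simpler
-- what changed: Replaces A's single stateful pass with its 'guessed' bookkeeping set and in-place overwrites by a declarative three-step pipeline: extract (key, pid_type, is_default) triples once, build the defaults map in one filtered pass (duplicate-default check), then fill the prefix map at the first covering entry of each pid_type using defaults.get(pid_type, pid_type), so defaults win without any overwrite or 'guessed' set.
import Mathlib
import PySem

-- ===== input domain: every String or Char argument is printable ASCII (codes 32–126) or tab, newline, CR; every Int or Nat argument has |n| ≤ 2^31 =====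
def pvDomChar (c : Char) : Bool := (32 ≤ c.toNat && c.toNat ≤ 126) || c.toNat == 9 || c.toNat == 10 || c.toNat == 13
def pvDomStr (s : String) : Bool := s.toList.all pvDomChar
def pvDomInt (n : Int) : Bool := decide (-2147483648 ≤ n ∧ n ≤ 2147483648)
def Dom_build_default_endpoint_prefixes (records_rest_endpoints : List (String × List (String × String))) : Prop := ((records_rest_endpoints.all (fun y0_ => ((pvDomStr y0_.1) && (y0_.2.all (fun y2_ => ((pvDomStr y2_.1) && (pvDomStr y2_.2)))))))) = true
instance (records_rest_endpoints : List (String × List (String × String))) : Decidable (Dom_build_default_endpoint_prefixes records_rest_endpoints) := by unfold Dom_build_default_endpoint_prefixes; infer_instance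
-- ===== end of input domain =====

-- B replaces A's single stateful pass (with its 'guessed' bookkeeping set) by a pass that
-- collects the defaults first and a second pass that fills the prefix map; same return value.

-- Python dict semantics for the incoming dict-of-dicts (duplicate keys: last value, first position).
def pvNormalize (records_rest_endpoints : List (String × List (String × String))) :
    List (String × PySem.Dict String String) :=
  (PySem.Dict.ofList (records_rest_endpoints.map (fun kv => (kv.1, PySem.Dict.ofList kv.2)))).items

-- endpoint.get('default_endpoint_prefix', False) used as a truth value (non-empty string = truthy)
def pvIsDefault (endpoint : PySem.Dict String String) : Bool :=
  match endpoint.get? "default_endpoint_prefix" with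
  | some s => !(s == "")
  | none => false

-- ===== PORT A =====
-- A's loop; `none` = ValueError/KeyError raised (excluded by Pre_).
def pvLoopA : List (String × PySem.Dict String String) → PySem.Set String → PySem.Set String →
    PySem.Dict String String → Option (PySem.Set String × PySem.Dict String String)
  | [], pidTypes, _, prefixes => some (pidTypes, prefixes)
  | (key, endpoint) :: rest, pidTypes, guessed, prefixes =>
    match endpoint.get? "pid_type" with
    | none => none  -- KeyError
    | some p =>
      let pidTypes := PySem.Set.add pidTypes p
      if pvIsDefault endpoint then
        if prefixes.contains p && !(PySem.Set.contains guessed p) then none  -- ValueError: more than one default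
        else pvLoopA rest pidTypes (PySem.Set.discard guessed p) (prefixes.insert p key)
      else if key == p && !(prefixes.contains p) then
        pvLoopA rest pidTypes (PySem.Set.add guessed p) (prefixes.insert p key)
      else pvLoopA rest pidTypes guessed prefixes

def build_default_endpoint_prefixes (records_rest_endpoints : List (String × List (String × String))) : List (String × String) :=
  match pvLoopA (pvNormalize records_rest_endpoints) PySem.Set.empty PySem.Set.empty PySem.Dict.empty with
  | none => []  -- raised: outside Pre_
  | some (pidTypes, prefixes) =>
    let notFound := PySem.Set.diff pidTypes prefixes.keys
    if notFound.isEmpty then prefixes.items else []  -- nonempty: ValueError, outside Pre_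

-- ===== PORT B =====
-- the items comprehension (none = KeyError on a missing 'pid_type')
def pvItemsB : List (String × PySem.Dict String String) → Option (List (String × String × Bool))
  | [] => some []
  | (key, endpoint) :: rest =>
    match endpoint.get? "pid_type" with
    | none => none
    | some p =>
      match pvItemsB rest with
      | none => none
      | some ts => some ((key, p, pvIsDefault endpoint) :: ts)

-- pass 1: the defaults map (none = ValueError: more than one default)
def pvDefaultsB : List (String × String × Bool) → PySem.Dict String String →
    Option (PySem.Dict String String)
  | [], dfl => some dfl
  | (key, p, isDefault) :: rest, dfl =>
    if isDefault then
      if dfl.contains p then none else pvDefaultsB rest (dfl.insert p key)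
    else pvDefaultsB rest dfl

-- pass 2 step: fill the prefix map at the first covering entry of each pid_type
def pvFillB (dfl : PySem.Dict String String) (prefixes : PySem.Dict String String)
    (t : String × String × Bool) : PySem.Dict String String :=
  if (t.2.2 || t.1 == t.2.1) && !(prefixes.contains t.2.1) then
    prefixes.insert t.2.1 (dfl.getD t.2.1 t.2.1)
  else prefixes

def build_default_endpoint_prefixes_alt (records_rest_endpoints : List (String × List (String × String))) : List (String × String) :=
  match pvItemsB (pvNormalize records_rest_endpoints) with
  | none => []  -- KeyError: outside Pre_
  | some items =>
    let pidTypes := PySem.Set.ofList (items.map (fun t => t.2.1))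
    match pvDefaultsB items PySem.Dict.empty with
    | none => []  -- ValueError: outside Pre_
    | some dfl =>
      let prefixes := items.foldl (pvFillB dfl) PySem.Dict.empty
      let notFound := PySem.Set.diff pidTypes prefixes.keys
      if notFound.isEmpty then prefixes.items else []  -- ValueError: outside Pre_

-- ===== PRECONDITION & SPEC =====
-- Pre_ = exactly the inputs where the Python A returns (no exception), stated on the normalized
-- dict: every endpoint has a 'pid_type'; no two entries are defaults for the same pid_type
-- (A's first ValueError); every pid_type is covered by a default or a key==pid_type entry
-- (A's 'No endpoint-prefix' ValueError).
def Pre_build_default_endpoint_prefixes (records_rest_endpoints : List (String × List (String × String))) : Prop :=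
  (∀ kv ∈ pvNormalize records_rest_endpoints, (kv.2.get? "pid_type").isSome = true) ∧
  (((pvNormalize records_rest_endpoints).filter (fun kv => pvIsDefault kv.2)).map
      (fun kv => kv.2.getD "pid_type" "")).Nodup ∧
  (∀ kv ∈ pvNormalize records_rest_endpoints, ∃ kv' ∈ pvNormalize records_rest_endpoints,
      kv'.2.getD "pid_type" "" = kv.2.getD "pid_type" "" ∧
      (pvIsDefault kv'.2 = true ∨ kv'.1 = kv.2.getD "pid_type" ""))

instance (records_rest_endpoints : List (String × List (String × String))) : Decidable (Pre_build_default_endpoint_prefixes records_rest_endpoints) := by unfold Pre_build_default_endpoint_prefixes; infer_instance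

def pvWitness_build_default_endpoint_prefixes : (List (String × List (String × String))) :=
  [("recid", [("pid_type", "p"), ("default_endpoint_prefix", "1")]),
   ("q", [("pid_type", "q")])]

def Spec_build_default_endpoint_prefixes (records_rest_endpoints : List (String × List (String × String))) (out : List (String × String)) : Prop := out = build_default_endpoint_prefixes_alt records_rest_endpoints
instance (records_rest_endpoints : List (String × List (String × String))) (out : List (String × String)) : Decidable (Spec_build_default_endpoint_prefixes records_rest_endpoints out) := by unfold Spec_build_default_endpoint_prefixes; infer_instance

-- ===== CLAIM (what is proved, stated in full; the proofs are below) =====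
def Claim_equal_build_default_endpoint_prefixes : Prop := ∀ (records_rest_endpoints : List (String × List (String × String))), Dom_build_default_endpoint_prefixes records_rest_endpoints → Pre_build_default_endpoint_prefixes records_rest_endpoints → Spec_build_default_endpoint_prefixes records_rest_endpoints (build_default_endpoint_prefixes records_rest_endpoints)

-- ===== LEMMAS AND PROOFS =====

-- proof-side helpers ----------------------------------------------------------

-- A's per-entry data: (key, pid_type, is_default)
def pvExtrD (kv : String × PySem.Dict String String) : String × String × Bool :=
  (kv.1, kv.2.getD "pid_type" "", pvIsDefault kv.2)

-- A's loop on extracted items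
def pvLoopI : List (String × String × Bool) → PySem.Set String → PySem.Set String →
    PySem.Dict String String → Option (PySem.Set String × PySem.Dict String String)
  | [], S, _, P => some (S, P)
  | (k, p, d) :: rest, S, G, P =>
    if d then
      if P.contains p && !(PySem.Set.contains G p) then none
      else pvLoopI rest (PySem.Set.add S p) (PySem.Set.discard G p) (P.insert p k)
    else if k == p && !(P.contains p) then
      pvLoopI rest (PySem.Set.add S p) (PySem.Set.add G p) (P.insert p k)
    else pvLoopI rest (PySem.Set.add S p) G P

-- B's view of A's prefix map: guessed keys already carry their final default value
def pvAdj (dfl : PySem.Dict String String) (G : PySem.Set String)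
    (P : PySem.Dict String String) : PySem.Dict String String :=
  PySem.Dict.mk (P.items.map (fun q => if q.1 ∈ G then (q.1, dfl.getD q.1 q.1) else q))

lemma pvItemsB_eq (N : List (String × PySem.Dict String String))
    (h : ∀ kv ∈ N, (kv.2.get? "pid_type").isSome = true) :
    pvItemsB N = some (N.map pvExtrD) := by
  induction N with
  | nil => rfl
  | cons kv rest ih =>
    obtain ⟨p, hp⟩ := Option.isSome_iff_exists.mp (h kv (by simp))
    simp only [pvItemsB, hp, ih (fun kv hkv => h kv (by simp [hkv])), List.map_cons]
    simp [pvExtrD, PySem.Dict.getD_eq_get?_getD, hp]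

lemma pvLoopA_eq (N : List (String × PySem.Dict String String))
    (S G : PySem.Set String) (P : PySem.Dict String String)
    (h : ∀ kv ∈ N, (kv.2.get? "pid_type").isSome = true) :
    pvLoopA N S G P = pvLoopI (N.map pvExtrD) S G P := by
  induction N generalizing S G P with
  | nil => rfl
  | cons kv rest ih =>
    obtain ⟨p, hp⟩ := Option.isSome_iff_exists.mp (h kv (by simp))
    obtain ⟨key, e⟩ := kv
    simp only [pvLoopA, List.map_cons, pvExtrD, pvLoopI,
      PySem.Dict.getD_eq_get?_getD, hp, Option.getD_some]
    have ih' := fun S G P => ih S G P (fun kv hkv => h kv (by simp [hkv]))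
    split_ifs <;> simp [ih']

lemma pvDefaultsB_ok : ∀ (items : List (String × String × Bool)) (d0 : PySem.Dict String String),
    ((items.filter (fun t => t.2.2)).map (fun t => t.2.1)).Nodup →
    (∀ t ∈ items, t.2.2 = true → d0.contains t.2.1 = false) →
    ∃ dfl, pvDefaultsB items d0 = some dfl
      ∧ (∀ t ∈ items, t.2.2 = true → dfl.get? t.2.1 = some t.1)
      ∧ (∀ q k', dfl.get? q = some k' → d0.get? q = some k' ∨ (k', q, true) ∈ items)
      ∧ (∀ q, (∀ t ∈ items, t.2.2 = true → t.2.1 ≠ q) → dfl.get? q = d0.get? q) := by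
  intro items
  induction items with
  | nil => intro d0 _ _; exact ⟨d0, rfl, by simp, by simp, by simp⟩
  | cons t rest ih =>
    obtain ⟨k, p, d⟩ := t
    intro d0 hnd hfresh
    by_cases hd : d = true
    · subst hd
      have hfc : ((k, p, true) :: rest).filter (fun t => t.2.2) =
          (k, p, true) :: rest.filter (fun t => t.2.2) := by simp
      rw [hfc, List.map_cons, List.nodup_cons] at hnd
      have hnd' := hnd.2
      have hpnot : ∀ t ∈ rest, t.2.2 = true → t.2.1 ≠ p := by
        intro t ht htd hEq
        exact hnd.1 (List.mem_map.mpr ⟨t, List.mem_filter.mpr ⟨ht, by simp [htd]⟩, hEq⟩)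
      have hc0 : d0.contains p = false := hfresh (k, p, true) (by simp) rfl
      have hfresh' : ∀ t ∈ rest, t.2.2 = true → (d0.insert p k).contains t.2.1 = false := by
        intro t ht htd
        rw [PySem.Dict.contains_insert]
        simp [hpnot t ht htd, hfresh t (by simp [ht]) htd]
      obtain ⟨dfl, hrun, h2, h3, h4⟩ := ih (d0.insert p k) (by simpa using hnd') hfresh'
      refine ⟨dfl, ?_, ?_, ?_, ?_⟩
      · simp [pvDefaultsB, hc0, hrun]
      · intro t ht htd
        rcases List.mem_cons.mp ht with h | h
        · subst h
          have := h4 p (fun t ht htd => hpnot t ht htd)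
          simpa [PySem.Dict.get?_insert_self] using this
        · exact h2 t h htd
      · intro q k' hq
        rcases h3 q k' hq with h | h
        · rw [PySem.Dict.get?_insert] at h
          split_ifs at h with hqp
          · subst hqp
            right; simp at h; simp [h]
          · exact Or.inl h
        · right; simp [h]
      · intro q hq
        have hq' : ∀ t ∈ rest, t.2.2 = true → t.2.1 ≠ q := fun t ht => hq t (by simp [ht])
        have hpq : p ≠ q := hq (k, p, true) (by simp) rfl
        rw [h4 q hq', PySem.Dict.get?_insert_of_ne _ _ (Ne.symm hpq)]
    · simp only [Bool.not_eq_true] at hd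
      subst hd
      have hfc : ((k, p, false) :: rest).filter (fun t => t.2.2) =
          rest.filter (fun t => t.2.2) := by simp
      rw [hfc] at hnd
      obtain ⟨dfl, hrun, h2, h3, h4⟩ := ih d0 hnd
        (fun t ht => hfresh t (by simp [ht]))
      refine ⟨dfl, by simp [pvDefaultsB, hrun], ?_, ?_, ?_⟩
      · intro t ht htd
        rcases List.mem_cons.mp ht with h | h
        · subst h; simp at htd
        · exact h2 t h htd
      · intro q k' hq
        rcases h3 q k' hq with h | h
        · exact Or.inl h
        · right; simp [h]
      · intro q hq
        exact h4 q (fun t ht => hq t (by simp [ht]))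

lemma pvAdj_keys (dfl : PySem.Dict String String) (G : PySem.Set String)
    (P : PySem.Dict String String) : (pvAdj dfl G P).keys = P.keys := by
  simp only [pvAdj, PySem.Dict.keys, List.map_map]
  apply List.map_congr_left
  intro q _
  by_cases h : q.1 ∈ G <;> simp [h]

lemma pvAdj_contains (dfl : PySem.Dict String String) (G : PySem.Set String)
    (P : PySem.Dict String String) (q : String) :
    (pvAdj dfl G P).contains q = P.contains q := by
  rw [PySem.Dict.contains_eq_decide_mem_keys, PySem.Dict.contains_eq_decide_mem_keys,
    pvAdj_keys]

lemma pv_not_contains_key (P : PySem.Dict String String) (p : String)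
    (h : P.contains p = false) : ∀ q ∈ P.items, q.1 ≠ p := by
  intro q hq hEq
  have : p ∈ P.keys := by
    simp only [PySem.Dict.keys]
    exact List.mem_map.mpr ⟨q, hq, hEq⟩
  rw [PySem.Dict.contains_eq_decide_mem_keys] at h
  simp [this] at h

lemma pvAdj_insert_fresh (dfl : PySem.Dict String String) (G G' : PySem.Set String)
    (P : PySem.Dict String String) (p v w : String)
    (hc : P.contains p = false)
    (hold : ∀ q, q ≠ p → (q ∈ G' ↔ q ∈ G))
    (hnew : (if p ∈ G' then ((p : String), dfl.getD p p) else (p, v)) = (p, w)) :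
    pvAdj dfl G' (P.insert p v) = (pvAdj dfl G P).insert p w := by
  apply PySem.Dict.ext
  rw [PySem.Dict.items_insert_of_not_contains _ _ (by rw [pvAdj_contains]; exact hc)]
  simp only [pvAdj]
  rw [PySem.Dict.items_insert_of_not_contains _ _ hc]
  rw [List.map_append]
  congr 1
  · apply List.map_congr_left
    intro q hq
    have hqp := pv_not_contains_key P p hc q hq
    by_cases h : q.1 ∈ G
    · simp [h, (hold q.1 hqp).mpr h]
    · have : q.1 ∉ G' := fun hh => h ((hold q.1 hqp).mp hh)
      simp [h, this]
  · simpa using hnew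

lemma pvAdj_overwrite (dfl : PySem.Dict String String) (G : PySem.Set String)
    (P : PySem.Dict String String) (p k : String)
    (hc : P.contains p = true) (hG : p ∈ G)
    (hdfl : dfl.getD p p = k)
    (hval : P.get? p = some p) (hnd : P.keys.Nodup) :
    pvAdj dfl (PySem.Set.discard G p) (P.insert p k) = pvAdj dfl G P := by
  apply PySem.Dict.ext
  simp only [pvAdj]
  rw [PySem.Dict.items_insert_of_contains _ _ hc]
  rw [List.map_map]
  apply List.map_congr_left
  rintro ⟨q1, q2⟩ hq
  by_cases hqp : q1 = p
  · subst hqp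
    have hq2 : q2 = q1 := by
      have hgv := PySem.Dict.get?_of_mem_items (d := P) (k := q1) (v := q2) hq hnd
      rw [hval] at hgv
      exact Option.some.inj hgv.symm
    subst hq2
    simp [PySem.Set.mem_discard, hG, hdfl]
  · have hbq : ((q1, q2).1 == p) = false := by simp [hqp]
    simp only [Function.comp_apply, hbq, Bool.false_eq_true, if_false]
    by_cases h : q1 ∈ G
    · have hd2 : q1 ∈ PySem.Set.discard G p := (PySem.Set.mem_discard _ _ _).mpr ⟨h, hqp⟩
      simp [h, hd2]
    · have hd2 : q1 ∉ PySem.Set.discard G p := fun hh => h ((PySem.Set.mem_discard _ _ _).mp hh).1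
      simp [h, hd2]

lemma pvAdj_id (dfl : PySem.Dict String String) (G : PySem.Set String)
    (P : PySem.Dict String String)
    (hnone : ∀ q ∈ G, dfl.get? q = none)
    (hval : ∀ q ∈ G, P.get? q = some q) (hnd : P.keys.Nodup) :
    pvAdj dfl G P = P := by
  apply PySem.Dict.ext
  simp only [pvAdj]
  conv_rhs => rw [← List.map_id P.items]
  apply List.map_congr_left
  rintro ⟨q1, q2⟩ hq
  by_cases h : q1 ∈ G
  · have hq2 : q2 = q1 := by
      have hgv := PySem.Dict.get?_of_mem_items (d := P) (k := q1) (v := q2) hq hnd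
      rw [hval q1 h] at hgv
      exact (Option.some.inj hgv).symm
    have hgd : dfl.getD q1 q1 = q1 := by
      rw [PySem.Dict.getD_eq_get?_getD, hnone q1 h]; rfl
    subst hq2
    simp [h, hgd]
  · simp [h]

lemma pv_main (dfl : PySem.Dict String String) :
    ∀ (items : List (String × String × Bool)) (S G : PySem.Set String)
      (P : PySem.Dict String String),
    (items.map (fun t => t.1)).Nodup →
    (∀ t ∈ items, t.2.2 = true → dfl.get? t.2.1 = some t.1) →
    (∀ t ∈ items, t.2.2 = true → P.contains t.2.1 = true → t.2.1 ∈ G) →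
    (∀ q k', dfl.get? q = some k' → (k', q, true) ∈ items ∨ (P.contains q = true ∧ q ∉ G)) →
    (∀ q ∈ G, P.get? q = some q) →
    P.keys.Nodup →
    ∃ G' P', pvLoopI items S G P = some (items.foldl (fun s t => PySem.Set.add s t.2.1) S, P')
      ∧ items.foldl (pvFillB dfl) (pvAdj dfl G P) = pvAdj dfl G' P'
      ∧ (∀ q k', dfl.get? q = some k' → P'.contains q = true ∧ q ∉ G')
      ∧ (∀ q ∈ G', P'.get? q = some q)
      ∧ P'.keys.Nodup := by
  intro items
  induction items with
  | nil =>
    intro S G P _ _ _ he hG hnd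
    refine ⟨G, P, rfl, rfl, ?_, hG, hnd⟩
    intro q k' hq
    rcases he q k' hq with h | h
    · simp at h
    · exact h
  | cons t rest ih =>
    obtain ⟨k, p, d⟩ := t
    intro S G P hk ha hg he hG hnd
    have hk' : (rest.map (fun t => t.1)).Nodup := by simpa using hk.of_cons
    have hkmem : k ∉ rest.map (fun t => t.1) := by
      simp only [List.map_cons, List.nodup_cons] at hk
      exact hk.1
    have ha' : ∀ t ∈ rest, t.2.2 = true → dfl.get? t.2.1 = some t.1 :=
      fun t ht => ha t (by simp [ht])
    by_cases hd : d = true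
    · subst hd
      have hdfl : dfl.get? p = some k := ha (k, p, true) (by simp) rfl
      -- no other default for p remains in rest
      have hne : ∀ t ∈ rest, t.2.2 = true → t.2.1 ≠ p := by
        intro t ht htd hEq
        have h1 := ha' t ht htd
        rw [hEq, hdfl] at h1
        have : t.1 = k := (Option.some.inj h1).symm
        exact hkmem (List.mem_map.mpr ⟨t, ht, this⟩)
      by_cases hP : P.contains p = true
      · -- overwrite case: p already guessed
        have hpG : p ∈ G := hg (k, p, true) (by simp) rfl hP
        have hloop : pvLoopI ((k, p, true) :: rest) S G P =
            pvLoopI rest (PySem.Set.add S p) (PySem.Set.discard G p) (P.insert p k) := by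
          simp [pvLoopI, hP, hpG]
        have hstep : pvFillB dfl (pvAdj dfl G P) (k, p, true) = pvAdj dfl G P := by
          simp [pvFillB, pvAdj_contains, hP]
        have hadj : pvAdj dfl (PySem.Set.discard G p) (P.insert p k) = pvAdj dfl G P :=
          pvAdj_overwrite dfl G P p k hP hpG
            (by rw [PySem.Dict.getD_eq_get?_getD, hdfl]; rfl) (hG p hpG) hnd
        obtain ⟨G', P', h1, h2, h3, h4, h5⟩ :=
          ih (PySem.Set.add S p) (PySem.Set.discard G p) (P.insert p k) hk' ha'
            (by
              intro t ht htd hc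
              rw [PySem.Dict.contains_insert] at hc
              have : (t.2.1 == p) = false := by simp [hne t ht htd]
              rw [this] at hc
              simp only [Bool.false_or] at hc
              exact (PySem.Set.mem_discard _ _ _).mpr ⟨hg t (by simp [ht]) htd hc, hne t ht htd⟩)
            (by
              intro q k' hq
              rcases he q k' hq with h | h
              · rcases List.mem_cons.mp h with h | h
                · right
                  have hqp : q = p := by cases h; rfl
                  have hkk : k' = k := by cases h; rfl
                  subst hqp
                  constructor
                  · rw [PySem.Dict.contains_insert]; simp
                  · intro hmem; exact ((PySem.Set.mem_discard _ _ _).mp hmem).2 rfl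
                · exact Or.inl h
              · right
                refine ⟨?_, ?_⟩
                · rw [PySem.Dict.contains_insert, h.1]; simp
                · intro hmem; exact h.2 ((PySem.Set.mem_discard _ _ _).mp hmem).1)
            (by
              intro q hq
              obtain ⟨hqG, hqp⟩ := (PySem.Set.mem_discard _ _ _).mp hq
              rw [PySem.Dict.get?_insert_of_ne _ _ hqp]
              exact hG q hqG)
            (PySem.Dict.nodup_keys_insert _ _ _ hnd)
        refine ⟨G', P', ?_, ?_, h3, h4, h5⟩
        · rw [hloop, h1]; rfl
        · rw [List.foldl_cons, hstep, ← hadj]; exact h2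
      · -- fresh default
        have hPf : P.contains p = false := by simpa using hP
        have hloop : pvLoopI ((k, p, true) :: rest) S G P =
            pvLoopI rest (PySem.Set.add S p) (PySem.Set.discard G p) (P.insert p k) := by
          simp [pvLoopI, hPf]
        have hstep : pvFillB dfl (pvAdj dfl G P) (k, p, true) =
            (pvAdj dfl G P).insert p (dfl.getD p p) := by
          simp [pvFillB, pvAdj_contains, hPf]
        have hadj : pvAdj dfl (PySem.Set.discard G p) (P.insert p k) =
            (pvAdj dfl G P).insert p (dfl.getD p p) := by
          apply pvAdj_insert_fresh dfl G _ P p k _ hPf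
          · intro q hq; exact ⟨fun h => ((PySem.Set.mem_discard _ _ _).mp h).1,
              fun h => (PySem.Set.mem_discard _ _ _).mpr ⟨h, hq⟩⟩
          · have : p ∉ PySem.Set.discard G p := fun h => ((PySem.Set.mem_discard _ _ _).mp h).2 rfl
            rw [if_neg this]
            simp [PySem.Dict.getD_eq_get?_getD, hdfl]
        obtain ⟨G', P', h1, h2, h3, h4, h5⟩ :=
          ih (PySem.Set.add S p) (PySem.Set.discard G p) (P.insert p k) hk' ha'
            (by
              intro t ht htd hc
              rw [PySem.Dict.contains_insert] at hc
              have : (t.2.1 == p) = false := by simp [hne t ht htd]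
              rw [this] at hc
              simp only [Bool.false_or] at hc
              exact (PySem.Set.mem_discard _ _ _).mpr ⟨hg t (by simp [ht]) htd hc, hne t ht htd⟩)
            (by
              intro q k' hq
              rcases he q k' hq with h | h
              · rcases List.mem_cons.mp h with h | h
                · right
                  have hqp : q = p := by cases h; rfl
                  subst hqp
                  constructor
                  · rw [PySem.Dict.contains_insert]; simp
                  · intro hmem; exact ((PySem.Set.mem_discard _ _ _).mp hmem).2 rfl
                · exact Or.inl h
              · right
                refine ⟨?_, ?_⟩
                · rw [PySem.Dict.contains_insert, h.1]; simp
                · intro hmem; exact h.2 ((PySem.Set.mem_discard _ _ _).mp hmem).1)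
            (by
              intro q hq
              obtain ⟨hqG, hqp⟩ := (PySem.Set.mem_discard _ _ _).mp hq
              rw [PySem.Dict.get?_insert_of_ne _ _ hqp]
              exact hG q hqG)
            (PySem.Dict.nodup_keys_insert _ _ _ hnd)
        refine ⟨G', P', ?_, ?_, h3, h4, h5⟩
        · rw [hloop, h1]; rfl
        · rw [List.foldl_cons, hstep, ← hadj]; exact h2
    · -- not a default entry
      have hdf : d = false := by simpa using hd
      subst hdf
      by_cases hgu : k = p ∧ P.contains p = false
      · obtain ⟨hkp, hPf⟩ := hgu
        subst hkp
        have hloop : pvLoopI ((k, k, false) :: rest) S G P =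
            pvLoopI rest (PySem.Set.add S k) (PySem.Set.add G k) (P.insert k k) := by
          simp [pvLoopI, hPf]
        have hstep : pvFillB dfl (pvAdj dfl G P) (k, k, false) =
            (pvAdj dfl G P).insert k (dfl.getD k k) := by
          simp [pvFillB, pvAdj_contains, hPf]
        have hadj : pvAdj dfl (PySem.Set.add G k) (P.insert k k) =
            (pvAdj dfl G P).insert k (dfl.getD k k) := by
          apply pvAdj_insert_fresh dfl G _ P k k _ hPf
          · intro q hq
            rw [PySem.Set.mem_add _ _ _]
            exact ⟨fun h => h.resolve_right hq, Or.inl⟩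
          · have : k ∈ PySem.Set.add G k := (PySem.Set.mem_add _ _ _).mpr (Or.inr rfl)
            simp [this]
        obtain ⟨G', P', h1, h2, h3, h4, h5⟩ :=
          ih (PySem.Set.add S k) (PySem.Set.add G k) (P.insert k k) hk' ha'
            (by
              intro t ht htd hc
              rw [PySem.Dict.contains_insert] at hc
              rw [PySem.Set.mem_add _ _ _]
              by_cases hqk : t.2.1 = k
              · exact Or.inr hqk
              · have : (t.2.1 == k) = false := by simp [hqk]
                rw [this] at hc
                simp only [Bool.false_or] at hc
                exact Or.inl (hg t (by simp [ht]) htd hc))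
            (by
              intro q k' hq
              rcases he q k' hq with h | h
              · rcases List.mem_cons.mp h with h | h
                · exact absurd h (by simp)
                · exact Or.inl h
              · right
                have hqk : q ≠ k := by
                  intro hEq; rw [hEq] at h; rw [h.1] at hPf; exact absurd hPf (by simp)
                refine ⟨?_, ?_⟩
                · rw [PySem.Dict.contains_insert, h.1]; simp
                · rw [PySem.Set.mem_add _ _ _]
                  rintro (hh | hh)
                  · exact h.2 hh
                  · exact hqk hh)
            (by
              intro q hq
              rcases (PySem.Set.mem_add _ _ _).mp hq with hh | hh
              · have hqk : q ≠ k := by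
                  intro hEq
                  have hgk := hG q hh
                  rw [hEq] at hgk
                  have hck : P.contains k = true := by
                    rw [PySem.Dict.contains_eq_isSome_get?, hgk]; rfl
                  rw [hck] at hPf; exact absurd hPf (by simp)
                rw [PySem.Dict.get?_insert_of_ne _ _ hqk]
                exact hG q hh
              · subst hh
                exact PySem.Dict.get?_insert_self _ _ _)
            (PySem.Dict.nodup_keys_insert _ _ _ hnd)
        refine ⟨G', P', ?_, ?_, h3, h4, h5⟩
        · rw [hloop, h1]; rfl
        · rw [List.foldl_cons, hstep, ← hadj]; exact h2
      · -- skipped entry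
        have hcond : (k == p && !P.contains p) = false := by
          by_cases h1 : k = p
          · subst h1
            have : P.contains k = true := by
              by_contra hcc
              exact hgu ⟨rfl, by simpa using hcc⟩
            simp [this]
          · simp [h1]
        have hloop : pvLoopI ((k, p, false) :: rest) S G P =
            pvLoopI rest (PySem.Set.add S p) G P := by
          simp only [pvLoopI, if_neg (by simp : ¬(false = true))]
          rw [hcond]
          rfl
        have hstep : pvFillB dfl (pvAdj dfl G P) (k, p, false) = pvAdj dfl G P := by
          simp only [pvFillB]
          rw [pvAdj_contains]
          simp only [Bool.false_or]
          rw [hcond]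
          rfl
        obtain ⟨G', P', h1, h2, h3, h4, h5⟩ :=
          ih (PySem.Set.add S p) G P hk' ha'
            (fun t ht => hg t (by simp [ht]))
            (by
              intro q k' hq
              rcases he q k' hq with h | h
              · rcases List.mem_cons.mp h with h | h
                · exact absurd h (by simp)
                · exact Or.inl h
              · exact Or.inr h)
            hG hnd
        refine ⟨G', P', ?_, ?_, h3, h4, h5⟩
        · rw [hloop, h1]; rfl
        · rw [List.foldl_cons, hstep]; exact h2

-- ===== VERDICT (by name: the statement is the Claim_ definition above) =====
theorem build_default_endpoint_prefixes_spec : Claim_equal_build_default_endpoint_prefixes := by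
  intro l _hdom hpre
  obtain ⟨h1, h2, h3⟩ := hpre
  unfold Spec_build_default_endpoint_prefixes
  have hitems : pvItemsB (pvNormalize l) = some ((pvNormalize l).map pvExtrD) :=
    pvItemsB_eq _ h1
  have hloopb : pvLoopA (pvNormalize l) PySem.Set.empty PySem.Set.empty PySem.Dict.empty
      = pvLoopI ((pvNormalize l).map pvExtrD) PySem.Set.empty PySem.Set.empty
          PySem.Dict.empty :=
    pvLoopA_eq _ _ _ _ h1
  have hkeys : (((pvNormalize l).map pvExtrD).map (fun t => t.1)).Nodup := by
    rw [List.map_map]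
    have hnk := PySem.Dict.nodup_keys_ofList
      (l.map (fun kv => (kv.1, PySem.Dict.ofList kv.2)))
    simpa [pvNormalize, PySem.Dict.keys, Function.comp] using hnk
  have hnd : ((((pvNormalize l).map pvExtrD).filter (fun t => t.2.2)).map
      (fun t => t.2.1)).Nodup := by
    rw [List.filter_map, List.map_map]
    exact h2
  obtain ⟨dfl, hdrun, hda, hde, _⟩ := pvDefaultsB_ok ((pvNormalize l).map pvExtrD)
    PySem.Dict.empty hnd (by intro t _ _; exact PySem.Dict.contains_empty _)
  obtain ⟨G', P', hl1, hl2, hl3, hl4, hl5⟩ := pv_main dfl ((pvNormalize l).map pvExtrD)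
    PySem.Set.empty PySem.Set.empty PySem.Dict.empty hkeys hda
    (by intro t _ _ hc; rw [PySem.Dict.contains_empty] at hc; cases hc)
    (by
      intro q k' hq
      rcases hde q k' hq with h | h
      · rw [PySem.Dict.get?_empty] at h; cases h
      · exact Or.inl h)
    (by intro q hq; cases hq)
    (by rw [PySem.Dict.keys_empty]; exact List.nodup_nil)
  have hnone : ∀ q ∈ G', dfl.get? q = none := by
    intro q hq
    cases hh : dfl.get? q with
    | none => rfl
    | some k' => exact absurd hq (hl3 q k' hh).2
  have hid : pvAdj dfl G' P' = P' := pvAdj_id dfl G' P' hnone hl4 hl5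
  have hadj0 : pvAdj dfl PySem.Set.empty PySem.Dict.empty = PySem.Dict.empty := rfl
  have hfold : ((pvNormalize l).map pvExtrD).foldl (pvFillB dfl) PySem.Dict.empty = P' := by
    rw [← hadj0, hl2, hid]
  have hS : PySem.Set.ofList (((pvNormalize l).map pvExtrD).map (fun t => t.2.1))
      = ((pvNormalize l).map pvExtrD).foldl (fun s t => PySem.Set.add s t.2.1)
          PySem.Set.empty := by
    rw [← PySem.Set.update_nil_left, PySem.Set.update_map_eq_foldl_add]
    rfl
  unfold build_default_endpoint_prefixes build_default_endpoint_prefixes_alt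
  rw [hloopb, hitems, hl1]
  simp [hdrun, hfold]
  rw [← List.map_map, hS]
  rfl
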